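-- pv_equiv track=rewrite | github.com/harrytflv/foobar | level3/queue-to-do/solution.py | solution
-- ===== SOURCE A (Python) =====
-- def solution(start, num_of_workers):
-- 	ret = 0
-- 	for i in range(num_of_workers):
-- 		head = start + i * num_of_workers
-- 		num_of_current_line = num_of_workers - i
-- 		tail = head + num_of_current_line - 1
-- 		if (head % 2) == 0:
-- 			remains = num_of_current_line % 4
-- 			for i in range(remains):
-- 				ret ^= tail
-- 				tail -= 1
-- 		else:
-- 			ret ^= head
-- 			remains = (num_of_current_line - 1) % 4
-- 			for i in range(remains):
-- 				ret ^= tail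
-- 				tail -= 1
-- 	return ret
-- ===== SOURCE B (Python) =====
-- def solution(start, num_of_workers):
--     def prefix(n):
--         # XOR of 0..n for n >= 0, extended to all ints by the same mod-4 table
--         r = n % 4
--         if r == 0:
--             return n
--         if r == 1:
--             return 1
--         if r == 2:
--             return n + 1
--         return 0
--     ret = 0
--     for i in range(num_of_workers):
--         head = start + i * num_of_workers
--         tail = head + (num_of_workers - i) - 1
--         ret ^= prefix(tail) ^ prefix(head - 1)
--     return ret
-- ===== Notes on version B (the rewrite author's own statement) =====
-- stated objective: simpler
-- what changed: A's per-line parity branch with an inner remainder loop XOR-ing up to 3 trailing elements is replaced by a closed-form prefix-XOR helper (the mod-4 table for XOR of 0..n, extended to all ints), so each staircase line is computed in O(1) with no inner loop or mutable tail.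
import Mathlib
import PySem

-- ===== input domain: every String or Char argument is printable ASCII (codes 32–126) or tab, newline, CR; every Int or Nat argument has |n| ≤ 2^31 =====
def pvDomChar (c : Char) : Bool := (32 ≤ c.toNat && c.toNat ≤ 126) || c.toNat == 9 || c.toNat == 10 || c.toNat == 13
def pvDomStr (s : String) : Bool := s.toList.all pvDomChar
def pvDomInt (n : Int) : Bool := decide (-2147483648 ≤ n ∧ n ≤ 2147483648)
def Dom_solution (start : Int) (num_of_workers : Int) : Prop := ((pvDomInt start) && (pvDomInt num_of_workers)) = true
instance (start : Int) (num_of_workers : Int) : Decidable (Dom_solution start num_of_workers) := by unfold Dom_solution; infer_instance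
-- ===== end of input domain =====

-- B replaces A's parity branch and inner remainder loop by a closed-form mod-4 prefix-XOR table,
-- computing each staircase line in O(1); objective: simpler.


-- ===== PORT A =====
def solution (start : Int) (num_of_workers : Int) : Int :=
  (PySem.List.pyRange 0 num_of_workers 1).foldl (fun ret i =>
    let head := start + i * num_of_workers
    let num_of_current_line := num_of_workers - i
    let tail := head + num_of_current_line - 1
    if PySem.Int.mod head 2 = 0 then
      let remains := PySem.Int.mod num_of_current_line 4
      ((PySem.List.pyRange 0 remains 1).foldl
        (fun (st : Int × Int) _ => (PySem.Int.bxor st.1 st.2, st.2 - 1)) (ret, tail)).1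
    else
      let ret := PySem.Int.bxor ret head
      let remains := PySem.Int.mod (num_of_current_line - 1) 4
      ((PySem.List.pyRange 0 remains 1).foldl
        (fun (st : Int × Int) _ => (PySem.Int.bxor st.1 st.2, st.2 - 1)) (ret, tail)).1) 0

-- ===== PORT B =====
-- XOR of 0..n for n >= 0, extended to all ints by the same mod-4 table (Source B's `prefix`)
def pyPrefix (n : Int) : Int :=
  let r := PySem.Int.mod n 4
  if r = 0 then n
  else if r = 1 then 1
  else if r = 2 then n + 1
  else 0

def solution_alt (start : Int) (num_of_workers : Int) : Int :=
  (PySem.List.pyRange 0 num_of_workers 1).foldl (fun ret i =>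
    let head := start + i * num_of_workers
    let tail := head + (num_of_workers - i) - 1
    PySem.Int.bxor ret (PySem.Int.bxor (pyPrefix tail) (pyPrefix (head - 1)))) 0

-- ===== PRECONDITION & SPEC =====
def Spec_solution (start : Int) (num_of_workers : Int) (out : Int) : Prop := out = solution_alt start num_of_workers
instance (start : Int) (num_of_workers : Int) (out : Int) : Decidable (Spec_solution start num_of_workers out) := by unfold Spec_solution; infer_instance

-- ===== CLAIM (what is proved, stated in full; the proofs are below) =====
def Claim_equal_solution : Prop := ∀ (start : Int) (num_of_workers : Int), Dom_solution start num_of_workers → Spec_solution start num_of_workers (solution start num_of_workers)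

-- ===== LEMMAS AND PROOFS =====

-- sign/magnitude view of Python's infinite two's-complement integers
def pvDec (s : Bool) (m : Nat) : Int := if s then -(m : Int) - 1 else m

theorem pvBxor_char (a b : Int) :
    PySem.Int.bxor a b =
      pvDec (xor (decide (a < 0)) (decide (b < 0)))
        ((if a < 0 then (-a - 1).toNat else a.toNat) ^^^ (if b < 0 then (-b - 1).toNat else b.toNat)) := by
  unfold PySem.Int.bxor pvDec
  by_cases ha : a < 0 <;> by_cases hb : b < 0 <;>
    simp [ha, hb] <;> omega

theorem pvDec_neg (s : Bool) (m : Nat) : (pvDec s m < 0) = (s = true) := by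
  cases s <;> simp [pvDec] <;> omega

theorem pvDec_mag (s : Bool) (m : Nat) :
    (if pvDec s m < 0 then (-(pvDec s m) - 1).toNat else (pvDec s m).toNat) = m := by
  cases s <;> simp [pvDec] <;> omega

theorem pvBxor_assoc (a b c : Int) :
    PySem.Int.bxor (PySem.Int.bxor a b) c = PySem.Int.bxor a (PySem.Int.bxor b c) := by
  rw [pvBxor_char a b, pvBxor_char b c, pvBxor_char (pvDec _ _) c, pvBxor_char a (pvDec _ _)]
  rw [pvDec_mag, pvDec_mag]
  simp only [pvDec_neg, Bool.decide_coe, Bool.xor_assoc, Nat.xor_assoc]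

theorem pvBxor_left_comm (a b c : Int) :
    PySem.Int.bxor a (PySem.Int.bxor b c) = PySem.Int.bxor b (PySem.Int.bxor a c) := by
  rw [← pvBxor_assoc, PySem.Int.bxor_comm a b, pvBxor_assoc]

theorem pvZero_bxor (a : Int) : PySem.Int.bxor 0 a = a := by
  rw [PySem.Int.bxor_comm, PySem.Int.bxor_zero]

theorem pvBxor_one_of_even (n : Int) (h : n % 2 = 0) : PySem.Int.bxor n 1 = n + 1 := by
  have key : ∀ k : Nat, (2 * k) ^^^ 1 = 2 * k + 1 := by
    intro k
    apply Nat.eq_of_testBit_eq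
    intro i
    cases i with
    | zero => simp [Nat.testBit_zero]
    | succ j => simp [Nat.testBit_succ]
  rw [pvBxor_char]
  by_cases hn : n < 0
  · -- -n-1 is odd: (-n-1) = 2k+1, and (2k+1) ^^^ 1 = 2k
    obtain ⟨k, hk⟩ : ∃ k : Nat, (-n - 1).toNat = 2 * k + 1 := ⟨(-n - 2).toNat / 2, by omega⟩
    have hodd : (2 * k + 1) ^^^ 1 = 2 * k := by
      rw [← key k, Nat.xor_assoc]
      simp
    simp [hn, pvDec, hk, hodd]
    omega
  · obtain ⟨k, hk⟩ : ∃ k : Nat, n.toNat = 2 * k := ⟨n.toNat / 2, by omega⟩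
    simp [hn, pvDec, hk, key k]
    omega

theorem pvBxor_succ_of_even (n : Int) (h : n % 2 = 0) : PySem.Int.bxor n (n + 1) = 1 := by
  rw [← pvBxor_one_of_even n h, ← pvBxor_assoc, PySem.Int.bxor_self, pvZero_bxor]

-- pyPrefix satisfies the defining recurrence of the prefix XOR
theorem pvPrefix_step (n : Int) : pyPrefix n = PySem.Int.bxor (pyPrefix (n - 1)) n := by
  have hm : ∀ a : Int, PySem.Int.mod a 4 = a % 4 := fun a =>
    PySem.Int.mod_eq_emod_of_pos (by norm_num)
  have hr : n % 4 = 0 ∨ n % 4 = 1 ∨ n % 4 = 2 ∨ n % 4 = 3 := by omega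
  rcases hr with h | h | h | h
  · have h' : (n - 1) % 4 = 3 := by omega
    simp [pyPrefix, hm, h, h', pvZero_bxor]
  · have h' : (n - 1) % 4 = 0 := by omega
    have he : (n - 1) % 2 = 0 := by omega
    have h1 : PySem.Int.bxor (n - 1) n = 1 := by
      have := pvBxor_succ_of_even (n - 1) he
      rwa [show n - 1 + 1 = n by ring] at this
    simp [pyPrefix, hm, h, h', h1]
  · have h' : (n - 1) % 4 = 1 := by omega
    have he : n % 2 = 0 := by omega
    simp [pyPrefix, hm, h, h', PySem.Int.bxor_comm (1 : Int) n, pvBxor_one_of_even n he]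
  · have h' : (n - 1) % 4 = 2 := by omega
    simp [pyPrefix, hm, h, h', show n - 1 + 1 = n by ring, PySem.Int.bxor_self]

-- B's per-line value
def pvG (a b : Int) : Int := PySem.Int.bxor (pyPrefix b) (pyPrefix (a - 1))

theorem pvG_ext (a b : Int) : pvG a b = PySem.Int.bxor (pvG a (b - 1)) b := by
  unfold pvG
  rw [pvPrefix_step b, pvBxor_assoc, PySem.Int.bxor_comm b (pyPrefix (a - 1)), ← pvBxor_assoc]

theorem pvG_empty (b : Int) : pvG (b + 1) b = 0 := by
  simp [pvG, PySem.Int.bxor_self]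

-- descending XOR of k terms b, b-1, …, b-k+1 (what A's inner loop accumulates)
def pvXd (b : Int) : Nat → Int
  | 0 => 0
  | k + 1 => PySem.Int.bxor b (pvXd (b - 1) k)

theorem pvXd_eq_G (k : Nat) : ∀ b : Int, pvXd b k = pvG (b - k + 1) b := by
  induction k with
  | zero => intro b; simpa using (pvG_empty b).symm
  | succ k ih =>
    intro b
    have : pvXd b (k + 1) = PySem.Int.bxor b (pvG (b - 1 - k + 1) (b - 1)) := by
      simp [pvXd, ih (b - 1)]
    rw [this, show b - 1 - (k : Int) + 1 = b - k by ring,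
        show b - ((k : Nat) + 1 : Nat) + 1 = b - k by push_cast; ring,
        pvG_ext (b - k) b, PySem.Int.bxor_comm]

theorem pvG_drop4 (a b : Int) (h : a % 2 = 0) : pvG a b = pvG (a + 4) b := by
  have hm : ∀ x : Int, PySem.Int.mod x 4 = x % 4 := fun x =>
    PySem.Int.mod_eq_emod_of_pos (by norm_num)
  have hcase : a % 4 = 0 ∨ a % 4 = 2 := by omega
  unfold pvG
  congr 1
  rcases hcase with h4 | h4
  · have h1 : (a - 1) % 4 = 3 := by omega
    have h2 : (a + 4 - 1) % 4 = 3 := by omega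
    simp [pyPrefix, h1, h2]
  · have h1 : (a - 1) % 4 = 1 := by omega
    have h2 : (a + 4 - 1) % 4 = 1 := by omega
    simp [pyPrefix, hm, h1, h2]

theorem pvG_drop4q (q : Nat) : ∀ a b : Int, a % 2 = 0 → pvG a b = pvG (a + 4 * q) b := by
  induction q with
  | zero => intro a b _; simp
  | succ q ih =>
    intro a b h
    rw [pvG_drop4 a b h, ih (a + 4) b (by omega),
        show a + 4 + 4 * (q : Int) = a + 4 * ((q : Nat) + 1 : Nat) by push_cast; ring]

-- A's even-head line equals B's line value
theorem pvLine_even (head L : Int) (hh : head % 2 = 0) (hL : 0 ≤ L) :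
    pvXd (head + L - 1) (L % 4).toNat = pvG head (head + L - 1) := by
  set b := head + L - 1 with hb
  have hr : (0 : Int) ≤ L % 4 ∧ L % 4 < 4 := ⟨Int.emod_nonneg L (by norm_num), Int.emod_lt_of_pos L (by norm_num)⟩
  have hq : 0 ≤ L / 4 := Int.ediv_nonneg hL (by norm_num)
  have h4q : 4 * ((L / 4).toNat : Int) = L - L % 4 := by omega
  rw [pvXd_eq_G, show b - ((L % 4).toNat : Int) + 1 = head + 4 * ((L / 4).toNat : Int) by omega]
  exact (pvG_drop4q (L / 4).toNat head b hh).symm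

-- A's inner loop in terms of pvXd (the loop only uses the list's length)
theorem pvInner_fold (l : List Int) : ∀ ret tail : Int,
    (l.foldl (fun (st : Int × Int) _ => (PySem.Int.bxor st.1 st.2, st.2 - 1)) (ret, tail)).1
      = PySem.Int.bxor ret (pvXd tail l.length) := by
  induction l with
  | nil => intro ret tail; simp [pvXd, PySem.Int.bxor_zero]
  | cons x xs ih =>
    intro ret tail
    simp only [List.foldl_cons, List.length_cons]
    rw [ih (PySem.Int.bxor ret tail) (tail - 1)]
    rw [show xs.length + 1 = Nat.succ xs.length from rfl]
    simp [pvXd, pvBxor_assoc]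

theorem pvRange_len (r : Int) (h0 : 0 ≤ r) (h4 : r < 4) :
    (PySem.List.pyRange 0 r 1).length = r.toNat := by
  have : r = 0 ∨ r = 1 ∨ r = 2 ∨ r = 3 := by omega
  rcases this with h | h | h | h <;> subst h <;> decide

-- the two loop bodies agree on every index the outer range produces
theorem pvBody_eq (start n : Int) (ret i : Int) (hi : 0 ≤ i) (hin : i < n) :
    (let head := start + i * n
     let num_of_current_line := n - i
     let tail := head + num_of_current_line - 1
     if PySem.Int.mod head 2 = 0 then
       let remains := PySem.Int.mod num_of_current_line 4
       ((PySem.List.pyRange 0 remains 1).foldl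
         (fun (st : Int × Int) _ => (PySem.Int.bxor st.1 st.2, st.2 - 1)) (ret, tail)).1
     else
       let ret := PySem.Int.bxor ret head
       let remains := PySem.Int.mod (num_of_current_line - 1) 4
       ((PySem.List.pyRange 0 remains 1).foldl
         (fun (st : Int × Int) _ => (PySem.Int.bxor st.1 st.2, st.2 - 1)) (ret, tail)).1)
    = PySem.Int.bxor ret (PySem.Int.bxor (pyPrefix (start + i * n + (n - i) - 1)) (pyPrefix (start + i * n - 1))) := by
  have hm2 : PySem.Int.mod (start + i * n) 2 = (start + i * n) % 2 :=
    PySem.Int.mod_eq_emod_of_pos (by norm_num)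
  have hm4 : ∀ x : Int, PySem.Int.mod x 4 = x % 4 := fun x =>
    PySem.Int.mod_eq_emod_of_pos (by norm_num)
  set head := start + i * n with hhead
  set L := n - i with hLdef
  have hL1 : 1 ≤ L := by omega
  by_cases hpar : head % 2 = 0
  · simp only [hm2, hm4, hpar]
    rw [pvInner_fold, pvRange_len (L % 4) (Int.emod_nonneg L (by norm_num)) (Int.emod_lt_of_pos L (by norm_num))]
    rw [pvLine_even head L hpar (by omega)]
    rfl
  · have hodd : head % 2 = 1 := by omega
    simp only [hm2, hm4, if_neg (by omega : ¬ head % 2 = 0)]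
    rw [pvInner_fold, pvRange_len ((L - 1) % 4) (Int.emod_nonneg _ (by norm_num)) (Int.emod_lt_of_pos _ (by norm_num))]
    have heven : (head + 1) % 2 = 0 := by omega
    have hline := pvLine_even (head + 1) (L - 1) heven (by omega)
    rw [show head + 1 + (L - 1) - 1 = head + L - 1 by ring] at hline
    rw [hline]
    -- bxor (bxor ret head) (pvG (head+1) tail) = bxor ret (bxor (F tail) (F (head-1)))
    unfold pvG
    rw [show head + 1 - 1 = head by ring]
    rw [pvPrefix_step head, pvBxor_assoc]
    congr 1
    rw [pvBxor_left_comm head (pyPrefix (head + L - 1))]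
    congr 1
    rw [pvBxor_left_comm head (pyPrefix (head - 1)), PySem.Int.bxor_self, PySem.Int.bxor_zero]

-- ===== VERDICT (by name: the statement is the Claim_ definition above) =====
theorem solution_spec : Claim_equal_solution := by
  intro start n _
  unfold Spec_solution solution solution_alt
  apply PySem.List.foldl_congr_mem
  intro ret i hi
  rw [PySem.List.mem_pyRange_one] at hi
  exact pvBody_eq start n ret i hi.1 hi.2
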